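-- pv_equiv track=rewrite | github.com/nnmachine/find_template | get_form/views.py | DictComp
-- ===== SOURCE A (Python) =====
-- def DictComp(template, form):
--     #Массив типов полей формы для того, чтобы смотреть, полностью ли шаблон удовлетворяет форме,
--     #если все поля шаблона есть в форме, но в форме есть некоторые поля, которых в шаблоне нет
--     set_form = set(form.values())
--     for key in template:
--         if key == 'name':
--             continue
--         if key in form.keys() and template[key] == form[key]:
--             if form[key] in set_form:
--                 #Удаление из множества типов формы типа, если данный тип присутствует в шаблоне, как написано выше
--                 set_form.remove(form[key])
--         #Если ключа шаблона нет среди ключей формы, или значение шаблона и формы при одинаковом ключе различны,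
--         #то данный шаблон уже не подходит
--         if key not in form.keys() or template[key] != form[key]:
--             return False
--     #Если в массиве остались значения, значит в шаблоне нет необходимых для формы значенй, а значит шаблон не подходит
--     if bool(set_form):
--         return False
--     #Иначе подходит
--     return True
-- ===== SOURCE B (Python) =====
-- def DictComp(template, form):
--     # Phase 1: validate -- every template key except 'name' must be present in form
--     # with the same value.
--     for key in template:
--         if key == 'name':
--             continue
--         if key not in form or template[key] != form[key]:
--             return False
--     # Phase 2: the validated template values must cover every value of the form.
--     covered = {value for key, value in template.items() if key != 'name'}
--     return set(form.values()) == covered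
-- ===== Notes on version B (the rewrite author's own statement) =====
-- stated objective: simpler
-- what changed: Replaces A's single loop with in-place incremental set.remove bookkeeping by a clean two-phase validate-then-compare: first check every non-'name' template key matches the form, then compare set(form.values()) against the set of non-'name' template values.
import Mathlib
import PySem

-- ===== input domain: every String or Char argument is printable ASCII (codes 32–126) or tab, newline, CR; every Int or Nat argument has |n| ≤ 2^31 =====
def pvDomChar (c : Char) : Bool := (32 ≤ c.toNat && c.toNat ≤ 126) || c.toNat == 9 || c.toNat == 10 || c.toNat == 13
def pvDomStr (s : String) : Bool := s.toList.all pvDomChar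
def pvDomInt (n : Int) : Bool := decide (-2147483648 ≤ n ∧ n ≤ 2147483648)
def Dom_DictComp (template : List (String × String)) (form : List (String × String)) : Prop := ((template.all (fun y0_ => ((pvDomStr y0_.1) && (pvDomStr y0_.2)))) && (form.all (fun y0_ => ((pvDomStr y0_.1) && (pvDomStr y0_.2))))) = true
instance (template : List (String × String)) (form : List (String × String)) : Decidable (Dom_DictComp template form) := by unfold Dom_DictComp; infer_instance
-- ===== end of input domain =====

-- B replaces A's single loop with incremental set.remove bookkeeping by a two-phase
-- validate-then-compare (objective: simpler).

-- ===== PORT A =====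
-- the for-loop of A over the template's keys; iterating the dict yields its items,
-- so (k, tv) ranges over template.items and template[key] is tv
def pvALoop (fd : PySem.Dict String String) (L : List (String × String))
    (sf : PySem.Set String) : Bool :=
  match L with
  | [] =>
      -- if bool(set_form): return False / return True
      sf.isEmpty
  | (k, tv) :: rest =>
      if k == "name" then pvALoop fd rest sf
      else
        -- if key in form.keys() and template[key] == form[key]:
        --     if form[key] in set_form: set_form.remove(form[key])
        -- (inside the guard form[key] == template[key] = tv)
        let sf' := if fd.contains k && (some tv == fd.get? k) then
                     (if PySem.Set.contains sf tv then PySem.Set.discard sf tv else sf)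
                   else sf
        -- if key not in form.keys() or template[key] != form[key]: return False
        if !(fd.contains k) || !(some tv == fd.get? k) then false
        else pvALoop fd rest sf'

def DictComp (template : List (String × String)) (form : List (String × String)) : Bool :=
  let fd := PySem.Dict.ofList form
  pvALoop fd (PySem.Dict.ofList template).items (PySem.Set.ofList fd.values)

-- ===== PORT B =====
def DictComp_alt (template : List (String × String)) (form : List (String × String)) : Bool :=
  let fd := PySem.Dict.ofList form
  let td := PySem.Dict.ofList template
  -- phase 1: every non-'name' template key present in form with the same value
  if td.items.all (fun p => p.1 == "name" || (fd.contains p.1 && (some p.2 == fd.get? p.1))) then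
    -- phase 2: covered = {value for key, value in template.items() if key != 'name'}
    --          return set(form.values()) == covered
    PySem.Set.equal (PySem.Set.ofList fd.values)
      (PySem.Set.ofList ((td.items.filter (fun p => !(p.1 == "name"))).map (·.2)))
  else false

-- ===== PRECONDITION & SPEC =====
def Spec_DictComp (template : List (String × String)) (form : List (String × String)) (out : Bool) : Prop := out = DictComp_alt template form
instance (template : List (String × String)) (form : List (String × String)) (out : Bool) : Decidable (Spec_DictComp template form out) := by unfold Spec_DictComp; infer_instance

-- ===== CLAIM (what is proved, stated in full; the proofs are below) =====
def Claim_equal_DictComp : Prop := ∀ (template : List (String × String)) (form : List (String × String)), Dom_DictComp template form → Spec_DictComp template form (DictComp template form)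

-- ===== LEMMAS AND PROOFS =====

-- the discard step of A's loop
def pvStep (s : PySem.Set String) (p : String × String) : PySem.Set String :=
  if PySem.Set.contains s p.2 then PySem.Set.discard s p.2 else s

lemma pv_mem_step (s : PySem.Set String) (p : String × String) (y : String) :
    y ∈ pvStep s p ↔ y ∈ s ∧ y ≠ p.2 := by
  unfold pvStep
  split_ifs with h
  · simp [PySem.Set.mem_discard]
  · simp only [PySem.Set.contains_iff] at h
    constructor
    · intro hy; exact ⟨hy, fun he => h (he ▸ hy)⟩
    · exact fun hy => hy.1

lemma pv_mem_foldl_step (M : List (String × String)) :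
    ∀ (s : PySem.Set String) (y : String),
      y ∈ M.foldl pvStep s ↔ y ∈ s ∧ ∀ p ∈ M, y ≠ p.2 := by
  induction M with
  | nil => intro s y; simp
  | cons p M ih =>
      intro s y
      simp only [List.foldl_cons, ih, pv_mem_step, List.mem_cons]
      constructor
      · rintro ⟨⟨hy, hne⟩, hall⟩
        exact ⟨hy, fun q hq => by rcases hq with rfl | hq; exact hne; exact hall q hq⟩
      · rintro ⟨hy, hall⟩
        exact ⟨⟨hy, hall p (Or.inl rfl)⟩, fun q hq => hall q (Or.inr hq)⟩

-- A's loop, rewritten as "all keys match" && "the residual set is empty"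
lemma pvALoop_eq (fd : PySem.Dict String String) :
    ∀ (L : List (String × String)) (sf : PySem.Set String),
      pvALoop fd L sf =
        ((L.all (fun p => p.1 == "name" || (fd.contains p.1 && (some p.2 == fd.get? p.1)))) &&
         ((L.filter (fun p => !(p.1 == "name"))).foldl pvStep sf).isEmpty) := by
  intro L
  induction L with
  | nil => intro sf; simp [pvALoop]
  | cons p rest ih =>
      intro sf
      obtain ⟨k, tv⟩ := p
      by_cases hname : (k == "name") = true
      · simp [pvALoop, hname, ih]
      · by_cases hg : (fd.contains k && (some tv == fd.get? k)) = true
        · have h1 : (!(fd.contains k) || !(some tv == fd.get? k)) = false := by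
            simp_all
          simp only [pvALoop, hname, if_false, hg, if_true, h1, Bool.false_eq_true]
          rw [ih]
          simp [hname, hg, pvStep, List.foldl_cons]
        · have h1 : (!(fd.contains k) || !(some tv == fd.get? k)) = true := by
            simp_all
            rcases Bool.eq_false_or_eq_true (fd.contains k) with h | h
            · exact Or.inr (hg h)
            · exact Or.inl h
          simp [pvALoop, hname, hg, h1]

lemma pv_get?_mem_values (fd : PySem.Dict String String) (k v : String)
    (h : fd.get? k = some v) : v ∈ fd.values := by
  have := PySem.Dict.mem_items_of_get?_eq_some fd h
  simp only [PySem.Dict.values]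
  exact List.mem_map.mpr ⟨(k, v), this, rfl⟩

-- under the phase-1 check, residual emptiness coincides with set equality
lemma pv_empty_iff_equal (fd : PySem.Dict String String) (L : List (String × String))
    (hall : (L.all (fun p => p.1 == "name" || (fd.contains p.1 && (some p.2 == fd.get? p.1)))) = true) :
    ((L.filter (fun p => !(p.1 == "name"))).foldl pvStep (PySem.Set.ofList fd.values)).isEmpty =
      PySem.Set.equal (PySem.Set.ofList fd.values)
        (PySem.Set.ofList ((L.filter (fun p => !(p.1 == "name"))).map (·.2))) := by
  set F := L.filter (fun p => !(p.1 == "name")) with hF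
  have hmatch : ∀ p ∈ F, fd.get? p.1 = some p.2 := by
    intro p hp
    have hpL : p ∈ L := List.mem_of_mem_filter hp
    have hpn : (p.1 == "name") = false := by
      have := List.of_mem_filter hp
      simpa using this
    have := List.all_eq_true.mp hall p hpL
    simp only [hpn, Bool.false_or, Bool.and_eq_true, beq_iff_eq] at this
    exact this.2.symm
  rw [Bool.eq_iff_iff, List.isEmpty_iff, List.eq_nil_iff_forall_not_mem,
      PySem.Set.equal_iff]
  constructor
  · intro hemp y
    constructor
    · intro hy
      by_contra hnot
      have : y ∈ F.foldl pvStep (PySem.Set.ofList fd.values) := by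
        rw [pv_mem_foldl_step]
        refine ⟨hy, fun p hp he => ?_⟩
        exact hnot (by rw [PySem.Set.mem_ofList]; exact List.mem_map.mpr ⟨p, hp, he.symm⟩)
      exact hemp y this
    · intro hy
      rw [PySem.Set.mem_ofList] at hy
      obtain ⟨p, hp, rfl⟩ := List.mem_map.mp hy
      rw [PySem.Set.mem_ofList]
      exact pv_get?_mem_values fd p.1 p.2 (hmatch p hp)
  · intro heq y hy
    rw [pv_mem_foldl_step] at hy
    obtain ⟨hy1, hy2⟩ := hy
    have : y ∈ PySem.Set.ofList (F.map (·.2)) := (heq y).mp hy1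
    rw [PySem.Set.mem_ofList] at this
    obtain ⟨p, hp, he⟩ := List.mem_map.mp this
    exact hy2 p hp he.symm

-- ===== VERDICT (by name: the statement is the Claim_ definition above) =====
theorem DictComp_spec : Claim_equal_DictComp := by
  intro template form _
  unfold Spec_DictComp DictComp DictComp_alt
  rw [pvALoop_eq]
  by_cases hall : ((PySem.Dict.ofList template).items.all
      (fun p => p.1 == "name" ||
        ((PySem.Dict.ofList form).contains p.1 &&
          (some p.2 == (PySem.Dict.ofList form).get? p.1)))) = true
  · simp only [hall, Bool.true_and, if_true]
    exact pv_empty_iff_equal _ _ hall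
  · simp only [Bool.not_eq_true] at hall
    simp [hall]
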